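-- pv_equiv track=rewrite | github.com/ParkinWu/LeetCode | python/668.py | search_less_or_eq
-- ===== SOURCE A (Python) =====
-- def search_less_or_eq(m: int, n: int, target: int) -> int:
--     i = m
--     j = 1
--     ans = 0
--     while j <= n and i >= 1:
--         if i * j <= target:
--             ans += i
--             j += 1
--         else:
--             i -= 1
--     return ans
-- ===== SOURCE B (Python) =====
-- def search_less_or_eq(m: int, n: int, target: int) -> int:
--     # Divisor-block (hyperbola) summation of sum_{j=1..n} min(m, target//j).
--     if m <= 0 or n <= 0 or target < 0:
--         return 0
--     ans = 0
--     j = 1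
--     while j <= n:
--         q = target // j
--         if q <= 0:
--             break
--         if q >= m:
--             hi = min(n, target // m)
--             ans += m * (hi - j + 1)
--         else:
--             hi = min(n, target // q)
--             ans += q * (hi - j + 1)
--         j = hi + 1
--     return ans
-- ===== Notes on version B (the rewrite author's own statement) =====
-- stated objective: faster
-- what changed: Replaced the staircase walk (one step per row/column, O(m+n)) by divisor-block (hyperbola) summation of sum_{j=1..n} min(m, target//j), jumping over each run of equal quotients in one step.
import Mathlib
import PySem

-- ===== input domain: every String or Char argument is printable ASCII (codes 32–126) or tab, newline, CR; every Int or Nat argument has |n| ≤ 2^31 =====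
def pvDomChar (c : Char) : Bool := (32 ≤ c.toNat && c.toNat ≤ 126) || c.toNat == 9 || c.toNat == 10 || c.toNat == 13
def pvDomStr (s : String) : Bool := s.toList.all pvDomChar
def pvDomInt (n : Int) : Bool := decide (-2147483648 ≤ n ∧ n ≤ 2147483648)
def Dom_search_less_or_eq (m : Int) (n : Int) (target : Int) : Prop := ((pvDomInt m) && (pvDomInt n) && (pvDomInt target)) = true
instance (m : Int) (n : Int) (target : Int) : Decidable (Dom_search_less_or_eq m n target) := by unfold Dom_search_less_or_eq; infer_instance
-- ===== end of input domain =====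

-- B replaces A's O(m+n) staircase walk by divisor-block (hyperbola) summation of
-- sum_{j=1..n} min(m, target//j); equal return value proved for all inputs.

-- ===== PORT A =====
-- the while loop of A, state (i, j, ans)
def pvLoopA (n target : Int) (i j ans : Int) : Int :=
  if _h : j ≤ n ∧ 1 ≤ i then
    if i * j ≤ target then pvLoopA n target i (j + 1) (ans + i)
    else pvLoopA n target (i - 1) j ans
  else ans
termination_by (n - j + i).toNat
decreasing_by all_goals omega

def search_less_or_eq (m : Int) (n : Int) (target : Int) : Int :=
  pvLoopA n target m 1 0

-- ===== PORT B =====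
-- facts about floor division by a positive divisor, needed for loop termination
theorem pv_fd_pos (a b : Int) (hb : 0 < b) : PySem.Int.floordiv a b = a / b :=
  PySem.Int.floordiv_eq_ediv_of_pos hb

theorem pv_le_div (a b c : Int) (hb : 0 < b) : c ≤ a / b ↔ c * b ≤ a :=
  Int.le_ediv_iff_mul_le hb

theorem pv_div_mul_le (a b : Int) (hb : 0 < b) : a / b * b ≤ a :=
  Int.ediv_mul_le a (by omega)

theorem pv_fd_nonneg (a b : Int) (ha : 0 ≤ a) (hb : 0 < b) : 0 ≤ PySem.Int.floordiv a b := by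
  rw [pv_fd_pos a b hb]; exact Int.ediv_nonneg ha (by omega)

-- B's while loop, state (j, ans); the invariants 1 ≤ m, 0 ≤ target, 1 ≤ j are
-- carried as hypotheses because termination (the blocks move j forward) needs them
def pvLoopB (m n target : Int) (hm : 1 ≤ m) (ht : 0 ≤ target) (j ans : Int) (hj : 1 ≤ j) : Int :=
  if hjn : j ≤ n then
    if hq : PySem.Int.floordiv target j ≤ 0 then ans
    else if hqm : m ≤ PySem.Int.floordiv target j then
      pvLoopB m n target hm ht (min n (PySem.Int.floordiv target m) + 1)
        (ans + m * (min n (PySem.Int.floordiv target m) - j + 1))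
        (by have := pv_fd_nonneg target m ht (by omega); omega)
    else
      pvLoopB m n target hm ht (min n (PySem.Int.floordiv target (PySem.Int.floordiv target j)) + 1)
        (ans + PySem.Int.floordiv target j * (min n (PySem.Int.floordiv target (PySem.Int.floordiv target j)) - j + 1))
        (by have := pv_fd_nonneg target (PySem.Int.floordiv target j) ht (by omega); omega)
  else ans
termination_by (n - j + 1).toNat
decreasing_by
  · -- q ≥ m branch: j ≤ target/m since m ≤ target/j means m*j ≤ target
    rw [pv_fd_pos target j (by omega), pv_fd_pos target m (by omega)] at *
    have h1 : m * j ≤ target := (pv_le_div target j m (by omega)).mp hqm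
    have h2 : j ≤ target / m := (pv_le_div target m j (by omega)).mpr (by nlinarith)
    omega
  · -- q < m branch: j ≤ target/q since q = target/j satisfies q*j ≤ target
    rw [pv_fd_pos target j (by omega)] at *
    have h1 : target / j * j ≤ target := pv_div_mul_le target j (by omega)
    have h2 : j ≤ target / (target / j) := (pv_le_div target (target / j) j (by omega)).mpr (by nlinarith)
    rw [pv_fd_pos target (target / j) (by omega)]
    omega

def search_less_or_eq_alt (m : Int) (n : Int) (target : Int) : Int :=
  if h : m ≤ 0 ∨ n ≤ 0 ∨ target < 0 then 0
  else pvLoopB m n target (by omega) (by omega) 1 0 (by omega)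

-- ===== PRECONDITION & SPEC =====
def Spec_search_less_or_eq (m : Int) (n : Int) (target : Int) (out : Int) : Prop := out = search_less_or_eq_alt m n target
instance (m : Int) (n : Int) (target : Int) (out : Int) : Decidable (Spec_search_less_or_eq m n target out) := by unfold Spec_search_less_or_eq; infer_instance

-- ===== CLAIM (what is proved, stated in full; the proofs are below) =====
def Claim_equal_search_less_or_eq : Prop := ∀ (m : Int) (n : Int) (target : Int), Dom_search_less_or_eq m n target → Spec_search_less_or_eq m n target (search_less_or_eq m n target)

-- ===== LEMMAS AND PROOFS =====

-- intermediate description of A's loop: column-by-column sums of the running minimum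
def pvF (n target : Int) (i j : Int) : Int :=
  if _h : j ≤ n then
    if 1 ≤ min i (target / j) then min i (target / j) + pvF n target (min i (target / j)) (j + 1)
    else 0
  else 0
termination_by (n - j + 1).toNat
decreasing_by omega

-- the same with the running minimum replaced by min m (target//j) (valid for target ≥ 0)
def pvG (m n target : Int) (j : Int) : Int :=
  if _h : j ≤ n then
    if 1 ≤ min m (PySem.Int.floordiv target j) then
      min m (PySem.Int.floordiv target j) + pvG m n target (j + 1)
    else 0
  else 0
termination_by (n - j + 1).toNat
decreasing_by omega

theorem pvLoopA_eq_F (n target : Int) : ∀ i j ans : Int, 1 ≤ j →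
    pvLoopA n target i j ans = ans + pvF n target i j := by
  intro i j ans
  induction i, j, ans using pvLoopA.induct n target with
  | case1 i j ans h hle ih =>
    intro hj
    have hdiv : i ≤ target / j := (pv_le_div target j i (by omega)).mpr hle
    have hmin : min i (target / j) = i := by omega
    have heq : pvF n target i j = i + pvF n target i (j + 1) := by
      rw [pvF, dif_pos h.1, hmin, if_pos (show (1:Int) ≤ i by omega)]
    rw [pvLoopA, dif_pos h, if_pos hle, ih (by omega), heq]
    ring
  | case2 i j ans h hle ih =>
    intro hj
    have hdiv : ¬ (i ≤ target / j) := fun hc => hle ((pv_le_div target j i (by omega)).mp hc)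
    have hmin : min (i - 1) (target / j) = min i (target / j) := by omega
    rw [pvLoopA, dif_pos h, if_neg hle, ih hj]
    have heq : pvF n target (i - 1) j = pvF n target i j := by
      conv_lhs => rw [pvF]
      conv_rhs => rw [pvF]
      rw [hmin]
    rw [heq]
  | case3 i j ans h =>
    intro hj
    rw [pvLoopA, dif_neg h, pvF]
    by_cases hn : j ≤ n
    · have hi : ¬ (1 ≤ i) := by tauto
      have : ¬ (1 ≤ min i (target / j)) := by omega
      simp [hn, this]
    · simp [hn]

theorem pv_div_antitone (t j k : Int) (ht : 0 ≤ t) (hj : 1 ≤ j) (hk : j ≤ k) :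
    t / k ≤ t / j := by
  have h0 : 0 ≤ t / k := Int.ediv_nonneg ht (by omega)
  have h1 : t / k * k ≤ t := pv_div_mul_le t k (by omega)
  exact (pv_le_div t j (t / k) (by omega)).mpr (by nlinarith)

theorem pvF_eq_G (m n target : Int) (ht : 0 ≤ target) : ∀ i j : Int, 1 ≤ j →
    min i (target / j) = min m (target / j) → pvF n target i j = pvG m n target j := by
  intro i j
  induction i, j using pvF.induct n target with
  | case1 i j h hpos ih =>
    intro hj hmin
    have hanti : target / (j + 1) ≤ target / j := pv_div_antitone target j (j + 1) ht (by omega) (by omega)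
    have hrec : pvF n target (min i (target / j)) (j + 1) = pvG m n target (j + 1) :=
      ih (by omega) (by omega)
    rw [pvF, pvG, dif_pos h, dif_pos h, pv_fd_pos target j (by omega), if_pos hpos,
      if_pos (show (1:Int) ≤ min m (target / j) by omega), hrec]
    omega
  | case2 i j h hpos =>
    intro hj hmin
    rw [pvF, pvG, dif_pos h, dif_pos h, pv_fd_pos target j (by omega), if_neg hpos,
      if_neg (show ¬ (1:Int) ≤ min m (target / j) by omega)]
  | case3 i j h =>
    intro hj hmin
    rw [pvF, pvG]; simp [h]

-- a block of columns with one common value c telescopes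
theorem pvG_block (m n t c hi : Int) (hc : 1 ≤ c) (hhi : hi ≤ n) :
    ∀ N : Nat, ∀ j : Int, (hi + 1 - j).toNat = N → j ≤ hi + 1 →
      (∀ k, j ≤ k → k ≤ hi → min m (PySem.Int.floordiv t k) = c) →
      pvG m n t j = c * (hi - j + 1) + pvG m n t (hi + 1) := by
  intro N
  induction N with
  | zero =>
    intro j hN hle _
    have hj : j = hi + 1 := by omega
    subst hj
    have : c * (hi - (hi + 1) + 1) = 0 := by ring
    omega
  | succ N ih =>
    intro j hN hle hval
    have hjhi : j ≤ hi := by omega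
    have hv := hval j (le_refl j) hjhi
    rw [pvG, dif_pos (by omega : j ≤ n), hv, if_pos hc]
    rw [ih (j + 1) (by omega) (by omega) (fun k hk1 hk2 => hval k (by omega) hk2)]
    have : c * (hi - j + 1) = c + c * (hi - (j + 1) + 1) := by ring
    omega

theorem pvLoopB_eq_G (m n target : Int) (hm : 1 ≤ m) (ht : 0 ≤ target) :
    ∀ (N : Nat) (j ans : Int) (hj : 1 ≤ j), (n - j + 1).toNat ≤ N →
      pvLoopB m n target hm ht j ans hj = ans + pvG m n target j := by
  intro N
  induction N with
  | zero =>
    intro j ans hj hN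
    rw [pvLoopB, dif_neg (by omega : ¬ j ≤ n), pvG, dif_neg (by omega : ¬ j ≤ n)]
    omega
  | succ N ih =>
    intro j ans hj hN
    rw [pvLoopB]
    by_cases hjn : j ≤ n
    · rw [dif_pos hjn]
      by_cases hq : PySem.Int.floordiv target j ≤ 0
      · rw [dif_pos hq, pvG, dif_pos hjn,
          if_neg (show ¬ (1:Int) ≤ min m (PySem.Int.floordiv target j) by omega)]
        omega
      · have hqe : PySem.Int.floordiv target j = target / j := pv_fd_pos target j (by omega)
        have hq1 : 1 ≤ target / j := by omega
        have hqj : target / j * j ≤ target := pv_div_mul_le target j (by omega)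
        rw [dif_neg hq]
        by_cases hqm : m ≤ PySem.Int.floordiv target j
        · rw [dif_pos hqm]
          have hqm' : m ≤ target / j := by omega
          have hmj : m * j ≤ target := (pv_le_div target j m (by omega)).mp hqm'
          have hjle : j ≤ target / m := (pv_le_div target m j (by omega)).mpr (by nlinarith)
          have hfe : PySem.Int.floordiv target m = target / m := pv_fd_pos target m (by omega)
          rw [ih (min n (PySem.Int.floordiv target m) + 1) _ (by omega) (by omega)]
          rw [hfe]
          have hblk := pvG_block m n target m (min n (target / m)) hm (by omega)
            (min n (target / m) + 1 - j).toNat j rfl (by omega)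
            (fun k hk1 hk2 => by
              have hkm : k * m ≤ target := by
                have : k ≤ target / m := by omega
                exact (pv_le_div target m k (by omega)).mp this
              have h2 : m ≤ target / k := (pv_le_div target k m (by omega)).mpr (by nlinarith)
              rw [pv_fd_pos target k (by omega)]
              omega)
          rw [hblk]; ring
        · rw [dif_neg hqm]
          have hjle : j ≤ target / (target / j) :=
            (pv_le_div target (target / j) j (by omega)).mpr (by nlinarith)
          have hfe : PySem.Int.floordiv target (PySem.Int.floordiv target j) = target / (target / j) := by
            rw [hqe]; exact pv_fd_pos target (target / j) (by omega)
          rw [ih (min n (PySem.Int.floordiv target (PySem.Int.floordiv target j)) + 1) _ (by omega) (by omega)]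
          rw [hfe, hqe]
          have hblk := pvG_block m n target (target / j) (min n (target / (target / j))) hq1 (by omega)
            (min n (target / (target / j)) + 1 - j).toNat j rfl (by omega)
            (fun k hk1 hk2 => by
              have hk0 : 1 ≤ k := by omega
              have hkq : k * (target / j) ≤ target := by
                have : k ≤ target / (target / j) := by omega
                exact (pv_le_div target (target / j) k (by omega)).mp this
              have hge : target / j ≤ target / k := (pv_le_div target k (target / j) (by omega)).mpr (by nlinarith)
              have hle2 : target / k ≤ target / j := pv_div_antitone target j k ht hj hk1
              rw [pv_fd_pos target k (by omega)]
              omega)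
          rw [hblk]; ring
    · rw [dif_neg hjn, pvG, dif_neg hjn]
      omega

-- ===== VERDICT (by name: the statement is the Claim_ definition above) =====
theorem search_less_or_eq_spec : Claim_equal_search_less_or_eq := by
  intro m n target _
  unfold Spec_search_less_or_eq search_less_or_eq search_less_or_eq_alt
  rw [pvLoopA_eq_F n target m 1 0 (by omega)]
  by_cases h : m ≤ 0 ∨ n ≤ 0 ∨ target < 0
  · rw [dif_pos h, pvF]
    by_cases hn : (1:Int) ≤ n
    · have h1 : target / 1 = target := Int.ediv_one target
      have h2 : ¬ (1 ≤ min m target) := by omega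
      rw [dif_pos hn, h1, if_neg h2]
      norm_num
    · rw [dif_neg hn]
      norm_num
  · have hm : 1 ≤ m := by omega
    have hn : 1 ≤ n := by omega
    have ht : 0 ≤ target := by omega
    rw [dif_neg h]
    rw [pvLoopB_eq_G m n target (by omega) (by omega) (n - 1 + 1).toNat 1 0 (by omega) (by omega)]
    rw [pvF_eq_G m n target (by omega) m 1 (by omega) rfl]
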